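-- pv_equiv track=rewrite | github.com/Rahulnisanth/Complete-Python-Hub | Unstop-Practice/100DaysChallenge/Day-2.py | calculateFScore
-- ===== SOURCE A (Python) =====
-- def calculateFScore(cars, n) -> int:
--     def combinations(arr):
--         dump = 0
--         for i in range(len(arr)):
--             subset = 0
--             for j in range(i + 1):
--                 subset ^= arr[j]
--             dump ^= subset
--         return dump
--     result = 0
--     for i in range(n):
--         result ^= combinations(cars[i:])
--     return result if 1 <= n < 10000 else 0
-- ===== SOURCE B (Python) =====
-- def calculateFScore(cars, n) -> int:
--     # One running prefix-XOR pass per suffix instead of recomputing each prefix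
--     # from scratch; the out-of-range and gated iterations of A are skipped since
--     # they contribute nothing.
--     if not (1 <= n < 10000):
--         return 0
--     result = 0
--     for i in range(min(n, len(cars))):
--         running = 0
--         acc = 0
--         for x in cars[i:]:
--             running ^= x
--             acc ^= running
--         result ^= acc
--     return result
-- ===== Notes on version B (the rewrite author's own statement) =====
-- stated objective: faster
-- what changed: B replaces A's per-prefix recomputation with a single running prefix-XOR pass per suffix, gates on n up front and stops the outer loop at min(n, len(cars)) since empty suffixes contribute nothing.
import Mathlib
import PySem

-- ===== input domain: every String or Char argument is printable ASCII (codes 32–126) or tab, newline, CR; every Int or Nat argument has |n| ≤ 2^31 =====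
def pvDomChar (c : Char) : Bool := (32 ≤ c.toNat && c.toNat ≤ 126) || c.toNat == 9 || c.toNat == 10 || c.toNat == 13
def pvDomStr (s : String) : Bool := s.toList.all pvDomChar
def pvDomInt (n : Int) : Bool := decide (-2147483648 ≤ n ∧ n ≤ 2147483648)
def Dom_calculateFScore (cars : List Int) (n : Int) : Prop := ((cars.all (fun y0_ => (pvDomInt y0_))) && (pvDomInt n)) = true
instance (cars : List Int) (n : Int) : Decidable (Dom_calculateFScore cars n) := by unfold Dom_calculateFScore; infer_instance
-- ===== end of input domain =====

-- B computes each suffix's XOR-of-prefix-XORs with one running prefix-XOR pass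
-- instead of A's nested per-prefix recomputation, and skips iterations that the
-- gate or empty suffixes make irrelevant.


-- ===== PORT A =====
-- inner helper 'combinations(arr)': nested index loops, exactly as A writes them
def pyCombinations (arr : List Int) : Int :=
  (PySem.List.pyRange 0 (arr.length : Int) 1).foldl
    (fun dump i =>
      PySem.Int.bxor dump
        ((PySem.List.pyRange 0 (i + 1) 1).foldl
          (fun subset j => PySem.Int.bxor subset (PySem.List.pyGetD arr j 0)) 0)) 0

def calculateFScore (cars : List Int) (n : Int) : Int :=
  let result :=
    (PySem.List.pyRange 0 n 1).foldl
      (fun result i =>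
        PySem.Int.bxor result (pyCombinations (PySem.List.slice cars (some i) none))) 0
  if 1 ≤ n ∧ n < 10000 then result else 0

-- ===== PORT B =====
-- B's inner loop: one pass keeping (running prefix-XOR, accumulated XOR of prefixes)
def suffixPass (l : List Int) : Int :=
  (l.foldl
    (fun (p : Int × Int) x => (PySem.Int.bxor p.1 x, PySem.Int.bxor p.2 (PySem.Int.bxor p.1 x)))
    (0, 0)).2

def calculateFScore_alt (cars : List Int) (n : Int) : Int :=
  if 1 ≤ n ∧ n < 10000 then
    (PySem.List.pyRange 0 (min n (cars.length : Int)) 1).foldl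
      (fun result i =>
        PySem.Int.bxor result (suffixPass (PySem.List.slice cars (some i) none))) 0
  else 0

-- ===== PRECONDITION & SPEC =====
def Spec_calculateFScore (cars : List Int) (n : Int) (out : Int) : Prop := out = calculateFScore_alt cars n
instance (cars : List Int) (n : Int) (out : Int) : Decidable (Spec_calculateFScore cars n out) := by unfold Spec_calculateFScore; infer_instance

-- ===== CLAIM (what is proved, stated in full; the proofs are below) =====
def Claim_equal_calculateFScore : Prop := ∀ (cars : List Int) (n : Int), Dom_calculateFScore cars n → Spec_calculateFScore cars n (calculateFScore cars n)

-- ===== LEMMAS AND PROOFS =====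

-- basic algebra of Python's int XOR (PySem.Int.bxor)
theorem bxor_eq_xor (a b : Int) : PySem.Int.bxor a b = Int.xor a b := by
  rcases a with m | m <;> rcases b with n | n <;>
    simp [PySem.Int.bxor, Int.xor, Int.negSucc_eq] <;> omega

theorem bxor_assoc (a b c : Int) :
    PySem.Int.bxor (PySem.Int.bxor a b) c = PySem.Int.bxor a (PySem.Int.bxor b c) := by
  simp only [bxor_eq_xor]
  rcases a with m | m <;> rcases b with n | n <;> rcases c with k | k <;>
    simp [Int.xor, Nat.xor_assoc]

theorem zero_bxor (a : Int) : PySem.Int.bxor 0 a = a := by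
  rw [PySem.Int.bxor_comm]; exact PySem.Int.bxor_zero a

-- XOR of the first m elements of a list
def xorTake (arr : List Int) (m : Nat) : Int := (arr.take m).foldl PySem.Int.bxor 0

-- pulling the initial accumulator out of an XOR fold
theorem foldl_bxor_init (l : List Int) :
    ∀ init : Int, l.foldl PySem.Int.bxor init = PySem.Int.bxor init (l.foldl PySem.Int.bxor 0) := by
  induction l with
  | nil => intro init; simp [PySem.Int.bxor_zero]
  | cons x t ih =>
      intro init
      simp only [List.foldl_cons]
      rw [ih (PySem.Int.bxor init x), ih (PySem.Int.bxor 0 x), zero_bxor, bxor_assoc]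

theorem xorTake_cons (x : Int) (t : List Int) (k : Nat) :
    xorTake (x :: t) (k + 1) = PySem.Int.bxor x (xorTake t k) := by
  simp only [xorTake, List.take_succ_cons, List.foldl_cons]
  rw [foldl_bxor_init, zero_bxor]

-- A's inner subset loop computes the prefix XOR of the first k+1 elements
theorem inner_subset (arr : List Int) (k : Nat) (hk : k < arr.length) :
    (PySem.List.pyRange 0 ((k : Int) + 1) 1).foldl
      (fun subset j => PySem.Int.bxor subset (PySem.List.pyGetD arr j 0)) 0
      = xorTake arr (k + 1) := by
  have hlen : (arr.take (k + 1)).length = k + 1 := by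
    simp [List.length_take]; omega
  have hsame : (PySem.List.pyRange 0 ((k : Int) + 1) 1).foldl
      (fun subset j => PySem.Int.bxor subset (PySem.List.pyGetD arr j 0)) 0
      = (PySem.List.pyRange 0 ((k : Int) + 1) 1).foldl
      (fun subset j => PySem.Int.bxor subset (PySem.List.pyGetD (arr.take (k + 1)) j 0)) 0 := by
    refine PySem.List.foldl_congr_mem _ _ _ _ (fun acc j hj => ?_)
    have hb := (PySem.List.mem_pyRange_one).1 hj
    have hj0 : 0 ≤ j := hb.1
    have hjk : j < (k : Int) + 1 := hb.2
    have hjlt : j.toNat < k + 1 := by omega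
    rw [PySem.List.pyGetD_eq_getElem arr 0 hj0 (by omega),
        PySem.List.pyGetD_eq_getElem (arr.take (k + 1)) 0 hj0 (by omega)]
    congr 1
    rw [List.getElem_take]
  rw [hsame]
  have hcast : (k : Int) + 1 = ((arr.take (k + 1)).length : Int) := by
    rw [hlen]; push_cast; ring
  rw [hcast, PySem.List.foldl_pyRange_zero_pyGetD' (arr.take (k+1)) 0 PySem.Int.bxor 0]
  rfl

-- A's combinations = fold of the prefix XORs over the indices
theorem pyCombinations_eq (arr : List Int) :
    pyCombinations arr
      = (List.range arr.length).foldl (fun d k => PySem.Int.bxor d (xorTake arr (k + 1))) 0 := by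
  unfold pyCombinations
  rw [PySem.List.pyRange_one, List.foldl_map]
  simp only [Int.sub_zero, Int.toNat_natCast]
  refine PySem.List.foldl_congr_mem _ _ _ _ (fun acc k hk => ?_)
  have hklt : k < arr.length := List.mem_range.1 hk
  have : (0 : Int) + (k : Int) + 1 = (k : Int) + 1 := by ring
  rw [this, inner_subset arr k hklt]

-- B's single pass from an arbitrary state
theorem pass_general (l : List Int) :
    ∀ r a : Int,
      (l.foldl
        (fun (p : Int × Int) x => (PySem.Int.bxor p.1 x, PySem.Int.bxor p.2 (PySem.Int.bxor p.1 x)))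
        (r, a)).2
      = (List.range l.length).foldl
          (fun d k => PySem.Int.bxor d (PySem.Int.bxor r (xorTake l (k + 1)))) a := by
  induction l with
  | nil => intro r a; simp
  | cons x t ih =>
      intro r a
      simp only [List.foldl_cons, List.length_cons, List.range_succ_eq_map, List.foldl_cons,
        List.foldl_map]
      rw [ih (PySem.Int.bxor r x) (PySem.Int.bxor a (PySem.Int.bxor r x))]
      have h1 : xorTake (x :: t) 1 = x := by
        simp [xorTake, zero_bxor]
      rw [h1]
      refine PySem.List.foldl_congr_mem _ _ _ _ (fun acc k _ => ?_)
      simp only [xorTake_cons, bxor_assoc]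

theorem suffixPass_eq (l : List Int) :
    suffixPass l = (List.range l.length).foldl (fun d k => PySem.Int.bxor d (xorTake l (k + 1))) 0 := by
  unfold suffixPass
  rw [pass_general l 0 0]
  refine PySem.List.foldl_congr_mem _ _ _ _ (fun acc k _ => ?_)
  rw [zero_bxor]

theorem comb_eq_pass (l : List Int) : pyCombinations l = suffixPass l := by
  rw [pyCombinations_eq, suffixPass_eq]

-- empty-suffix iterations of A's outer loop do nothing
theorem tail_fold_id (cars : List Int) (a b : Int) (ha : (cars.length : Int) ≤ a) :
    ∀ init : Int,
      (PySem.List.pyRange a b 1).foldl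
        (fun result i =>
          PySem.Int.bxor result (pyCombinations (PySem.List.slice cars (some i) none))) init
      = init := by
  have h : ∀ i ∈ PySem.List.pyRange a b 1,
      PySem.List.slice cars (some i) none = ([] : List Int) := by
    intro i hi
    have hb := (PySem.List.mem_pyRange_one).1 hi
    have h0 : (0 : Int) ≤ i := le_trans (by positivity) (le_trans ha hb.1)
    rw [PySem.List.slice_from cars h0]
    exact List.drop_eq_nil_of_le (by omega)
  intro init
  rw [PySem.List.foldl_congr_mem _ _ (fun result _ => result) init
    (fun acc i hi => by rw [h i hi]; simp [pyCombinations, PySem.Int.bxor_zero])]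
  simp

-- ===== VERDICT (by name: the statement is the Claim_ definition above) =====
theorem calculateFScore_spec : Claim_equal_calculateFScore := by
  intro cars n _
  unfold Spec_calculateFScore calculateFScore calculateFScore_alt
  by_cases hg : 1 ≤ n ∧ n < 10000
  · simp only [hg]
    have hmain : ∀ m : Int, m ≤ (cars.length : Int) →
        (PySem.List.pyRange 0 m 1).foldl
          (fun result i =>
            PySem.Int.bxor result (pyCombinations (PySem.List.slice cars (some i) none))) 0
        = (PySem.List.pyRange 0 m 1).foldl
          (fun result i =>
            PySem.Int.bxor result (suffixPass (PySem.List.slice cars (some i) none))) 0 := by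
      intro m _
      exact PySem.List.foldl_congr_mem _ _ _ _ (fun acc i _ => by rw [comb_eq_pass])
    by_cases hle : n ≤ (cars.length : Int)
    · rw [min_eq_left hle]
      exact hmain n hle
    · rw [not_le] at hle
      rw [min_eq_right (le_of_lt hle)]
      rw [PySem.List.pyRange_one_append 0 (cars.length : Int) n (by positivity) (le_of_lt hle),
        List.foldl_append, tail_fold_id cars (cars.length : Int) n (le_refl _)]
      exact hmain (cars.length : Int) (le_refl _)
  · simp [hg]
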